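-- pv_equiv track=rewrite | github.com/ihgazni2/dlixhict-didactic | xdict/elist.py | last_continuous_indexes_slice
-- ===== SOURCE A (Python) =====
-- def last_continuous_indexes_slice(ol,value):
--     '''
--         from xdict.elist import *
--         ol = [1,"a","a",2,3,"a",4,"a","a","a",5]
--         last_continuous_indexes_slice(ol,"a")
--     '''
--     length = ol.__len__()
--     end = None
--     slice = []
--     for i in range(length-1,-1,-1):
--         if(ol[i]==value):
--             end = i
--             break
--         else:
--             pass
--     if(end == None):
--         return(None)
--     else:
--         slice.append(end)
--         for i in range(end-1,-1,-1):
--             if(ol[i]==value):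
--                 slice.append(i)
--             else:
--                 break
--     slice.reverse()
--     return(slice)
-- ===== SOURCE B (Python) =====
-- def last_continuous_indexes_slice(ol, value):
--     idxs = [i for i in range(len(ol)) if ol[i] == value]
--     if not idxs:
--         return None
--     run = []
--     cur = idxs[-1] + 1
--     for j in reversed(idxs):
--         if j + 1 == cur:
--             run.append(j)
--             cur = j
--         else:
--             break
--     run.reverse()
--     return run
-- ===== Notes on version B (the rewrite author's own statement) =====
-- stated objective: simpler
-- what changed: B replaces A's two backward index loops with one forward pass building the full match-index table, then peels the last contiguous run off that table's tail; same O(n) cost.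
import Mathlib
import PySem

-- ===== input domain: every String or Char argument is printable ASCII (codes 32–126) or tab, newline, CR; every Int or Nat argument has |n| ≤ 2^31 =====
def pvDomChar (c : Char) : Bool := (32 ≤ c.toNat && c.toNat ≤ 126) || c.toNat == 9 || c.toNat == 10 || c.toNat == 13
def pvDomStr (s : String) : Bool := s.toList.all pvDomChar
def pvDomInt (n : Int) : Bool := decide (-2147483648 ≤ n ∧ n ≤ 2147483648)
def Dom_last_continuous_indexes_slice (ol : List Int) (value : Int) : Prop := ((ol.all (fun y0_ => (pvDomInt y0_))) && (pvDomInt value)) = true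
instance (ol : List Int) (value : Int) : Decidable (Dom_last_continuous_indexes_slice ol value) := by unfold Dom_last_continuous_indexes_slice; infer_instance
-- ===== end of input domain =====

-- B builds the full list of matching indexes in one forward pass and extracts the last
-- contiguous run from its tail, instead of A's two backward scans of the list itself (simpler decomposition).

-- ===== PORT A =====
-- first loop: for i in range(length-1,-1,-1): if ol[i]==value: end=i; break
-- (indices scanned are always in range, so getD's default is never used)
def aFindEnd (ol : List Int) (value : Int) : Nat → Option Nat
  | 0 => none
  | k+1 => if ol.getD k 0 == value then some k else aFindEnd ol value k

-- second loop: for i in range(end-1,-1,-1): if ol[i]==value: slice.append(i) else: break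
def aCollect (ol : List Int) (value : Int) : Nat → List Nat
  | 0 => []
  | k+1 => if ol.getD k 0 == value then k :: aCollect ol value k else []

def last_continuous_indexes_slice (ol : List Int) (value : Int) : Option (List Int) :=
  match aFindEnd ol value ol.length with
  | none => none
  | some e => some (((e :: aCollect ol value e).reverse).map (fun k => (k : Int)))

-- ===== PORT B =====
-- the break-ing loop over reversed(idxs): keep j while j + 1 == cur
def bRun : Nat → List Nat → List Nat
  | _, [] => []
  | cur, j :: rest => if j + 1 = cur then j :: bRun j rest else []

def last_continuous_indexes_slice_alt (ol : List Int) (value : Int) : Option (List Int) :=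
  let idxs := (List.range ol.length).filter (fun i => ol.getD i 0 == value)
  match idxs.reverse with
  | [] => none
  | j :: rest => some ((bRun (j + 1) (j :: rest)).reverse.map (fun k => (k : Int)))

-- ===== PRECONDITION & SPEC =====
def Spec_last_continuous_indexes_slice (ol : List Int) (value : Int) (out : Option (List Int)) : Prop := out = last_continuous_indexes_slice_alt ol value
instance (ol : List Int) (value : Int) (out : Option (List Int)) : Decidable (Spec_last_continuous_indexes_slice ol value out) := by unfold Spec_last_continuous_indexes_slice; infer_instance

-- ===== CLAIM (what is proved, stated in full; the proofs are below) =====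
def Claim_equal_last_continuous_indexes_slice : Prop := ∀ (ol : List Int) (value : Int), Dom_last_continuous_indexes_slice ol value → Spec_last_continuous_indexes_slice ol value (last_continuous_indexes_slice ol value)

-- ===== LEMMAS AND PROOFS =====

-- the match-index table restricted to indices < k
def idxsUpTo (ol : List Int) (value : Int) (k : Nat) : List Nat :=
  (List.range k).filter (fun i => ol.getD i 0 == value)

theorem idxsUpTo_succ (ol : List Int) (value : Int) (k : Nat) :
    idxsUpTo ol value (k+1) =
      idxsUpTo ol value k ++ (if ol.getD k 0 == value then [k] else []) := by
  simp only [idxsUpTo, List.range_succ, List.filter_append, List.filter_cons, List.filter_nil]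

theorem mem_idxsUpTo_lt {ol : List Int} {value : Int} {k j : Nat}
    (h : j ∈ idxsUpTo ol value k) : j < k := by
  simp only [idxsUpTo, List.mem_filter, List.mem_range] at h
  exact h.1

theorem aCollect_eq_bRun (ol : List Int) (value : Int) :
    ∀ k, aCollect ol value k = bRun k ((idxsUpTo ol value k).reverse) := by
  intro k
  induction k with
  | zero => simp [aCollect, idxsUpTo, bRun]
  | succ k ih =>
    rw [idxsUpTo_succ]
    by_cases h : ol.getD k 0 == value
    · show (if (ol.getD k 0 == value) = true then k :: aCollect ol value k else []) = _
      rw [if_pos h]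
      simp only [if_pos h, List.reverse_append, List.reverse_cons, List.reverse_nil,
        List.nil_append, List.cons_append]
      simp [bRun, ih]
    · show (if (ol.getD k 0 == value) = true then k :: aCollect ol value k else []) = _
      rw [if_neg h, if_neg h, List.append_nil]
      cases hr : (idxsUpTo ol value k).reverse with
      | nil => simp [bRun]
      | cons j r =>
        have hj : j ∈ idxsUpTo ol value k := by
          have : j ∈ (idxsUpTo ol value k).reverse := by rw [hr]; exact List.mem_cons_self ..
          simpa using this
        have hlt : j < k := mem_idxsUpTo_lt hj
        simp only [bRun]
        rw [if_neg (by omega)]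

theorem aFindEnd_none {ol : List Int} {value : Int} {n : Nat}
    (h : aFindEnd ol value n = none) : idxsUpTo ol value n = [] := by
  induction n with
  | zero => simp [idxsUpTo]
  | succ n ih =>
    rw [idxsUpTo_succ]
    unfold aFindEnd at h
    by_cases hm : (ol.getD n 0 == value) = true
    · rw [if_pos hm] at h; exact absurd h (by simp)
    · rw [if_neg hm] at h
      rw [if_neg hm, ih h, List.append_nil]

theorem aFindEnd_some {ol : List Int} {value : Int} {n e : Nat}
    (h : aFindEnd ol value n = some e) :
    idxsUpTo ol value n = idxsUpTo ol value e ++ [e] := by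
  induction n with
  | zero => simp [aFindEnd] at h
  | succ n ih =>
    rw [idxsUpTo_succ]
    unfold aFindEnd at h
    by_cases hm : (ol.getD n 0 == value) = true
    · rw [if_pos hm] at h
      cases h
      rw [if_pos hm]
    · rw [if_neg hm] at h
      rw [if_neg hm, ih h, List.append_nil]

-- ===== VERDICT (by name: the statement is the Claim_ definition above) =====
theorem last_continuous_indexes_slice_spec : Claim_equal_last_continuous_indexes_slice := by
  intro ol value _
  unfold Spec_last_continuous_indexes_slice
  unfold last_continuous_indexes_slice last_continuous_indexes_slice_alt
  show _ = (match (idxsUpTo ol value ol.length).reverse with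
    | [] => none
    | j :: rest => some ((bRun (j + 1) (j :: rest)).reverse.map (fun k => (k : Int))))
  cases h : aFindEnd ol value ol.length with
  | none => rw [aFindEnd_none h]; simp
  | some e =>
    rw [aFindEnd_some h]
    simp only [List.reverse_append, List.reverse_cons, List.reverse_nil, List.nil_append,
      List.cons_append]
    have : bRun (e + 1) (e :: (idxsUpTo ol value e).reverse)
        = e :: bRun e ((idxsUpTo ol value e).reverse) := by simp [bRun]
    rw [this, ← aCollect_eq_bRun]
    simp
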